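-- pv_equiv track=rewrite | github.com/giuliacencetti/Surrogate_net_generation | topological_metrics.py | event_counting
-- ===== SOURCE A (Python) =====
-- def event_counting(delta_t,In_times_dict,Dur_dict):
--     Ev_nb = []
--     ie_times_list = []
--     for edge in In_times_dict:
--         Ev_nb.append(1)
--         for n in range(len(In_times_dict[edge]) - 1):
--             ie_time = In_times_dict[edge][n+1] - (In_times_dict[edge][n] + Dur_dict[edge][n])
--             ie_times_list.append(ie_time)
--             if ie_time <= delta_t:
--                 Ev_nb[-1] += 1
--             elif ie_time > delta_t:
--                 Ev_nb.append(1)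
--     return Ev_nb,ie_times_list
-- ===== SOURCE B (Python) =====
-- def event_counting(delta_t, In_times_dict, Dur_dict):
--     Ev_nb = []
--     ie_times_list = []
--     for edge, times in In_times_dict.items():
--         durs = Dur_dict.get(edge, [])
--         ies = [t1 - (t0 + d) for t0, t1, d in zip(times, times[1:], durs)]
--         ie_times_list.extend(ies)
--         bounds = [-1] + [i for i, ie in enumerate(ies) if ie > delta_t] + [len(ies)]
--         Ev_nb.extend(b - a for a, b in zip(bounds, bounds[1:]))
--     return Ev_nb, ie_times_list
-- ===== Notes on version B (the rewrite author's own statement) =====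
-- stated objective: alternative
-- what changed: Per edge, B builds the inter-event list once by zipping consecutive times with durations and derives the event counts as successive differences of the break-index boundaries [-1]+breaks+[m], instead of A's running Ev_nb[-1] += 1 accumulator with repeated dict/list indexing.
import Mathlib
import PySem

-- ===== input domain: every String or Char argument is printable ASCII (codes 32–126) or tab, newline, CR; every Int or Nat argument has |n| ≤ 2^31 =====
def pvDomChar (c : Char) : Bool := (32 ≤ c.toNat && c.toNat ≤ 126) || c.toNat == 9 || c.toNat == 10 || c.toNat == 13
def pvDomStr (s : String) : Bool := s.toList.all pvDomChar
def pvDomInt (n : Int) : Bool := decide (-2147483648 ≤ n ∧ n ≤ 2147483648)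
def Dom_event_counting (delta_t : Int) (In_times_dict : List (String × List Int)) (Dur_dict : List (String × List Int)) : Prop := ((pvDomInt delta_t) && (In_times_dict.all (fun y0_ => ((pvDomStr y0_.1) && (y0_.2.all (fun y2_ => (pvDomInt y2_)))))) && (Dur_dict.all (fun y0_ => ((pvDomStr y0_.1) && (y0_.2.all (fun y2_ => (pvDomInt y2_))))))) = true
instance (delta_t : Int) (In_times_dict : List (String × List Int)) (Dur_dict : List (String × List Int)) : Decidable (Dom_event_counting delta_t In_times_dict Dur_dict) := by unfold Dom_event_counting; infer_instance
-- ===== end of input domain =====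

-- B replaces A's running `Ev_nb[-1] += 1` accumulator by per-edge run lengths read off the
-- break indices (successive differences of [-1] ++ breaks ++ [m]); objective: alternative decomposition.

-- ===== PORT A =====
-- Python `Ev_nb[-1] += 1`: read index -1, write back at -1 (exact: the list is nonempty at every use)
def pvIncLast (xs : List Int) : List Int :=
  xs.dropLast ++ [PySem.List.pyGetD xs (-1) 0 + 1]

def event_counting (delta_t : Int) (In_times_dict : List (String × List Int)) (Dur_dict : List (String × List Int)) : List Int × List Int :=
  let dIn := PySem.Dict.ofList In_times_dict
  let dDur := PySem.Dict.ofList Dur_dict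
  -- `for edge in In_times_dict:` iterates the dict's keys; `In_times_dict[edge]` / `Dur_dict[edge][n]`
  -- are ported total with getD/pyGetD: Pre_event_counting excludes exactly the KeyError/IndexError inputs.
  dIn.keys.foldl (fun acc edge =>
    let ts := dIn.getD edge []
    (PySem.List.pyRange 0 ((ts.length : Int) - 1) 1).foldl (fun acc2 n =>
      let ie := PySem.List.pyGetD ts (n + 1) 0 -
        (PySem.List.pyGetD ts n 0 + PySem.List.pyGetD (dDur.getD edge []) n 0)
      let iel := acc2.2 ++ [ie]
      if ie ≤ delta_t then (pvIncLast acc2.1, iel)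
      else if delta_t < ie then (acc2.1 ++ [1], iel)
      else (acc2.1, iel))
      (acc.1 ++ [1], acc.2))
    ([], [])

-- ===== PORT B =====
def event_counting_alt (delta_t : Int) (In_times_dict : List (String × List Int)) (Dur_dict : List (String × List Int)) : List Int × List Int :=
  let dIn := PySem.Dict.ofList In_times_dict
  let dDur := PySem.Dict.ofList Dur_dict
  dIn.items.foldl (fun acc p =>
    let times := p.2
    let durs := dDur.getD p.1 []  -- Dur_dict.get(edge, [])
    let ies := (times.zip ((PySem.List.slice times (some 1) none).zip durs)).map
      (fun q => q.2.1 - (q.1 + q.2.2))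
    let breaks := (PySem.List.enumerate ies 0).filterMap
      (fun q => if delta_t < q.2 then some q.1 else none)
    let bounds := [-1] ++ (breaks ++ [(ies.length : Int)])
    (acc.1 ++ (bounds.zip bounds.tail).map (fun q => q.2 - q.1), acc.2 ++ ies))
    ([], [])

-- ===== PRECONDITION & SPEC =====
-- Pre_ excludes exactly the inputs on which Python A raises: an edge whose time list has ≥ 2 entries
-- but whose key is missing from Dur_dict (KeyError) or whose duration list is too short (IndexError).
def Pre_event_counting (_delta_t : Int) (In_times_dict : List (String × List Int)) (Dur_dict : List (String × List Int)) : Prop :=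
  ∀ p ∈ (PySem.Dict.ofList In_times_dict).items,
    p.2.length ≤ ((PySem.Dict.ofList Dur_dict).getD p.1 []).length + 1
instance (delta_t : Int) (In_times_dict : List (String × List Int)) (Dur_dict : List (String × List Int)) : Decidable (Pre_event_counting delta_t In_times_dict Dur_dict) := by unfold Pre_event_counting; infer_instance

def pvWitness_event_counting : Int × (List (String × List Int)) × (List (String × List Int)) :=
  (2, [("a", [0, 1, 5]), ("b", [7])], [("a", [1, 0]), ("b", [])])

def Spec_event_counting (delta_t : Int) (In_times_dict : List (String × List Int)) (Dur_dict : List (String × List Int)) (out : List Int × List Int) : Prop := out = event_counting_alt delta_t In_times_dict Dur_dict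
instance (delta_t : Int) (In_times_dict : List (String × List Int)) (Dur_dict : List (String × List Int)) (out : List Int × List Int) : Decidable (Spec_event_counting delta_t In_times_dict Dur_dict out) := by unfold Spec_event_counting; infer_instance

-- ===== CLAIM (what is proved, stated in full; the proofs are below) =====
def Claim_equal_event_counting : Prop := ∀ (delta_t : Int) (In_times_dict : List (String × List Int)) (Dur_dict : List (String × List Int)), Dom_event_counting delta_t In_times_dict Dur_dict → Pre_event_counting delta_t In_times_dict Dur_dict → Spec_event_counting delta_t In_times_dict Dur_dict (event_counting delta_t In_times_dict Dur_dict)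

-- ===== LEMMAS AND PROOFS =====

-- Reference description of the per-edge event counts: segment lengths of the inter-event list.
def pvSegs (dt c : Int) : List Int → List Int
  | [] => [c]
  | ie :: rest => if ie ≤ dt then pvSegs dt (c + 1) rest else c :: pvSegs dt 1 rest

-- Successive differences, seeded with the previous boundary.
def pvDiffs (prev : Int) : List Int → List Int
  | [] => []
  | b :: bs => (b - prev) :: pvDiffs b bs

theorem pvIncLast_append (xs : List Int) (c : Int) : pvIncLast (xs ++ [c]) = xs ++ [c + 1] := by
  simp [pvIncLast, PySem.List.pyGetD_neg_one_append_singleton]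

-- A's inner loop, as a fold over the inter-event list, computes pvSegs.
theorem pvA_inner (dt : Int) (ies : List Int) : ∀ (ev0 : List Int) (c : Int) (iel : List Int),
    ies.foldl (fun acc2 ie =>
      let iel' := acc2.2 ++ [ie]
      if ie ≤ dt then (pvIncLast acc2.1, iel')
      else if dt < ie then (acc2.1 ++ [1], iel')
      else (acc2.1, iel')) (ev0 ++ [c], iel)
    = (ev0 ++ pvSegs dt c ies, iel ++ ies) := by
  induction ies with
  | nil => intro ev0 c iel; simp [pvSegs]
  | cons ie rest ih =>
    intro ev0 c iel
    by_cases h : ie ≤ dt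
    · simp only [List.foldl_cons, h, if_pos, pvIncLast_append, pvSegs]
      rw [ih ev0 (c + 1) (iel ++ [ie])]
      simp
    · have h' : dt < ie := by omega
      simp only [List.foldl_cons, h, h', if_pos, if_false, pvSegs]
      rw [show ev0 ++ [c] ++ [(1 : Int)] = (ev0 ++ [c]) ++ [1] by simp,
          ih (ev0 ++ [c]) 1 (iel ++ [ie])]
      simp

-- B's zip of boundaries with its tail is pvDiffs.
theorem pvZip_diffs (a : Int) (l : List Int) :
    ((a :: l).zip l).map (fun q => q.2 - q.1) = pvDiffs a l := by
  induction l generalizing a with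
  | nil => simp [pvDiffs]
  | cons b bs ih => simp [pvDiffs, ih b]

-- Differences of the break boundaries are exactly the segment lengths.
theorem pvDiffs_breaks (dt : Int) (ies : List Int) : ∀ (s prev : Int),
    pvDiffs prev ((PySem.List.enumerate ies s).filterMap
        (fun q => if dt < q.2 then some q.1 else none) ++ [s + (ies.length : Int)])
    = pvSegs dt (s - prev) ies := by
  induction ies with
  | nil => intro s prev; simp [PySem.List.enumerate, pvDiffs, pvSegs]
  | cons ie rest ih =>
    intro s prev
    by_cases h : ie ≤ dt
    · have h' : ¬ dt < ie := by omega
      simp only [PySem.List.enumerate_cons, List.filterMap_cons, h', if_false, pvSegs, h, if_pos]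
      rw [show s + ((ie :: rest).length : Int) = (s + 1) + (rest.length : Int) by simp; omega,
        ih (s + 1) prev, show s + 1 - prev = s - prev + 1 by omega]
    · have h' : dt < ie := by omega
      simp only [PySem.List.enumerate_cons, List.filterMap_cons, h', if_pos, pvSegs, h, if_false, List.cons_append, pvDiffs]
      rw [show s + ((ie :: rest).length : Int) = (s + 1) + (rest.length : Int) by simp; omega,
        ih (s + 1) s, show s + 1 - s = (1 : Int) by omega]

-- A's computed inter-event values over the index range are B's zip-built list.
theorem pvIes_eq (ts ds : List Int) (h : ts.length ≤ ds.length + 1) :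
    (PySem.List.pyRange 0 ((ts.length : Int) - 1) 1).map
      (fun n => PySem.List.pyGetD ts (n + 1) 0 -
        (PySem.List.pyGetD ts n 0 + PySem.List.pyGetD ds n 0))
    = (ts.zip ((PySem.List.slice ts (some 1) none).zip ds)).map
      (fun q => q.2.1 - (q.1 + q.2.2)) := by
  rw [PySem.List.slice_from_one]
  apply List.ext_getElem
  · simp [PySem.List.length_pyRange_one]
    omega
  · intro k h1 h2
    simp only [PySem.List.length_pyRange_one, List.length_map] at h1
    have hk : k + 1 < ts.length := by omega
    have hkd : k < ds.length := by omega
    simp only [List.getElem_map, PySem.List.getElem_pyRange_one, List.getElem_zip,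
      List.getElem_tail]
    have e1 : (0 : Int) + (k : Int) + 1 = ((k + 1 : Nat) : Int) := by push_cast; ring
    have e2 : (0 : Int) + (k : Int) = ((k : Nat) : Int) := by ring
    have hk0 : k < ts.length := by omega
    rw [e1, e2, PySem.List.pyGetD_natCast, PySem.List.pyGetD_natCast, PySem.List.pyGetD_natCast,
      List.getD_eq_getElem?_getD, List.getD_eq_getElem?_getD, List.getD_eq_getElem?_getD,
      List.getElem?_eq_getElem hk, List.getElem?_eq_getElem hk0, List.getElem?_eq_getElem hkd]
    simp

-- ===== VERDICT (by name: the statement is the Claim_ definition above) =====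
theorem event_counting_spec : Claim_equal_event_counting := by
  intro delta_t In Dur _ hpre
  unfold Spec_event_counting event_counting event_counting_alt
  simp only []
  rw [show (PySem.Dict.ofList In).keys
        = (PySem.Dict.ofList In).items.map (fun p => p.1) from rfl, List.foldl_map]
  apply PySem.List.foldl_congr_mem
  intro acc p hp
  have hnd := PySem.Dict.nodup_keys_ofList (κ := String) (ν := List Int) In
  have hget : (PySem.Dict.ofList In).getD p.1 [] = p.2 :=
    PySem.Dict.getD_of_mem_items _ hp hnd []
  have hlen : p.2.length ≤ ((PySem.Dict.ofList Dur).getD p.1 []).length + 1 := hpre p hp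
  simp only [hget]
  -- abbreviations for this edge
  set ds := (PySem.Dict.ofList Dur).getD p.1 [] with hds
  set ies := (p.2.zip ((PySem.List.slice p.2 (some 1) none).zip ds)).map
      (fun q => q.2.1 - (q.1 + q.2.2)) with hies
  have hfold : (PySem.List.pyRange 0 ((p.2.length : Int) - 1) 1).foldl
      (fun acc2 n =>
        (fun acc2 ie =>
          if ie ≤ delta_t then (pvIncLast acc2.1, acc2.2 ++ [ie])
          else if delta_t < ie then (acc2.1 ++ [1], acc2.2 ++ [ie])
          else (acc2.1, acc2.2 ++ [ie])) acc2
          (PySem.List.pyGetD p.2 (n + 1) 0 -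
            (PySem.List.pyGetD p.2 n 0 + PySem.List.pyGetD ds n 0)))
      (acc.1 ++ [1], acc.2)
      = ies.foldl (fun acc2 ie =>
          if ie ≤ delta_t then (pvIncLast acc2.1, acc2.2 ++ [ie])
          else if delta_t < ie then (acc2.1 ++ [1], acc2.2 ++ [ie])
          else (acc2.1, acc2.2 ++ [ie])) (acc.1 ++ [1], acc.2) := by
    refine Eq.trans
      (List.foldl_map
        (f := fun n => PySem.List.pyGetD p.2 (n + 1) 0 -
          (PySem.List.pyGetD p.2 n 0 + PySem.List.pyGetD ds n 0))
        (g := fun acc2 ie =>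
          if ie ≤ delta_t then (pvIncLast acc2.1, acc2.2 ++ [ie])
          else if delta_t < ie then (acc2.1 ++ [1], acc2.2 ++ [ie])
          else (acc2.1, acc2.2 ++ [ie]))
        (l := PySem.List.pyRange 0 ((p.2.length : Int) - 1) 1)
        (init := (acc.1 ++ [1], acc.2))).symm ?_
    rw [pvIes_eq p.2 ds hlen, ← hies]
  refine Eq.trans (hfold.trans ?_) rfl
  rw [pvA_inner delta_t ies acc.1 1 acc.2]
  have hz : (([(-1 : Int)] ++ ((PySem.List.enumerate ies 0).filterMap
        (fun q => if delta_t < q.2 then some q.1 else none) ++ [(ies.length : Int)])).zip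
      ([(-1 : Int)] ++ ((PySem.List.enumerate ies 0).filterMap
        (fun q => if delta_t < q.2 then some q.1 else none) ++ [(ies.length : Int)])).tail).map
      (fun q => q.2 - q.1) = pvSegs delta_t 1 ies := by
    simp only [List.singleton_append, List.tail_cons, pvZip_diffs]
    have h0 := pvDiffs_breaks delta_t ies 0 (-1)
    simpa using h0
  rw [hz]
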